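-- pv_equiv track=rewrite | github.com/Umang-Lodaya/GeeksForGeeks-Problems | Medium/Check if a string is repetition of its substring of k-length/check-if-a-string-is-repetition-of-its-substring-of-klength.py | kSubstrConcat
-- ===== SOURCE A (Python) =====
-- def kSubstrConcat(n, s, k):
-- 	if n % k != 0:
-- 	    return 0
--
-- 	sett = set()
-- 	e = k
-- 	for i in range(0, n - k + 1, k):
-- 	    sub = s[i:e]
-- 	    e += k
-- 	    sett.add(sub)
--
-- 	return 0 if len(sett) > 2 else 1
-- ===== SOURCE B (Python) =====
-- def kSubstrConcat(n, s, k):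
--     if n % k != 0:
--         return 0
--     chunks = sorted(s[i:i + k] for i in range(0, n - k + 1, k))
--     boundaries = sum(1 for a, b in zip(chunks, chunks[1:]) if a != b)
--     return 1 if boundaries <= 1 else 0
-- ===== Notes on version B (the rewrite author's own statement) =====
-- stated objective: alternative
-- what changed: B replaces A's single pass that accumulates chunks into a set by a staged sort-then-scan pipeline: it materialises the list of k-chunks, sorts it, and counts adjacent mismatching pairs (distinct chunks minus one), returning 1 iff that count is at most 1; no set or membership test anywhere.
import Mathlib
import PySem

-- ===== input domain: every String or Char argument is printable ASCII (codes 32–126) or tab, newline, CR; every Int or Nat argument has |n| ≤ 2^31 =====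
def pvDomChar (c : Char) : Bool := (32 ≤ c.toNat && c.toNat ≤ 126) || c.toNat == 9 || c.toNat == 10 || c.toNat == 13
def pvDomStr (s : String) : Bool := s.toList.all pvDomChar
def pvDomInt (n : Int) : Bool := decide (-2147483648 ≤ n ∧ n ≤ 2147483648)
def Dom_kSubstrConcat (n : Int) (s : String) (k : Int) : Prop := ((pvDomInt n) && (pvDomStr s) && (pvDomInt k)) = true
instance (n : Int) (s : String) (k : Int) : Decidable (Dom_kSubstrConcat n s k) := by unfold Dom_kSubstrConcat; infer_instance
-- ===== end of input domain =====

-- B replaces A's incremental set-of-chunks by a staged pipeline: collect the k-chunks, sort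
-- them, then count adjacent mismatches in the sorted list (objective: alternative algorithm).

-- ===== PORT A =====
def kSubstrConcat (n : Int) (s : String) (k : Int) : Int :=
  if PySem.Int.mod n k ≠ 0 then 0
  else
    let p := (PySem.List.pyRange 0 (n - k + 1) k).foldl
      (fun (p : PySem.Set String × Int) i =>
        (PySem.Set.add p.1 (PySem.Str.slice s (some i) (some p.2)), p.2 + k))
      (([] : PySem.Set String), k)
    if 2 < PySem.Set.len p.1 then 0 else 1

-- ===== PORT B =====
-- ports Source B's 'sum(1 for a, b in zip(chunks, chunks[1:]) if a != b)': the same walk over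
-- adjacent pairs with the same predicate, written tail-recursively (exact; List.zip/List.sum
-- would overflow the interpreter stack on large chunk lists)
def pvAdjMismatches : List String → Int → Int
  | a :: b :: t, acc => pvAdjMismatches (b :: t) (if a ≠ b then acc + 1 else acc)
  | _, acc => acc

def kSubstrConcat_alt (n : Int) (s : String) (k : Int) : Int :=
  if PySem.Int.mod n k ≠ 0 then 0
  else
    -- sorted(...) ported as Lean's stable sort List.mergeSort (same order, same result on strings)
    let chunks := ((PySem.List.pyRange 0 (n - k + 1) k).map
      (fun i => PySem.Str.slice s (some i) (some (i + k)))).mergeSort (fun a b => a ≤ b)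
    let boundaries := pvAdjMismatches chunks 0
    if boundaries ≤ 1 then 1 else 0

-- ===== PRECONDITION & SPEC =====
-- Pre_ excludes only k = 0, on which Python's 'n % k' raises ZeroDivisionError.
def Pre_kSubstrConcat (n : Int) (s : String) (k : Int) : Prop := k ≠ 0
instance (n : Int) (s : String) (k : Int) : Decidable (Pre_kSubstrConcat n s k) := by
  unfold Pre_kSubstrConcat; infer_instance

def pvWitness_kSubstrConcat : Int × String × Int := (4, "abab", 2)

def Spec_kSubstrConcat (n : Int) (s : String) (k : Int) (out : Int) : Prop := out = kSubstrConcat_alt n s k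
instance (n : Int) (s : String) (k : Int) (out : Int) : Decidable (Spec_kSubstrConcat n s k out) := by
  unfold Spec_kSubstrConcat; infer_instance

-- ===== CLAIM (what is proved, stated in full; the proofs are below) =====
def Claim_equal_kSubstrConcat : Prop := ∀ (n : Int) (s : String) (k : Int), Dom_kSubstrConcat n s k → Pre_kSubstrConcat n s k → Spec_kSubstrConcat n s k (kSubstrConcat n s k)

-- ===== LEMMAS AND PROOFS =====

-- general-step pyRange: head/tail and emptiness (PySem's pyRange lemmas cover only step 1 / positive step)
lemma pyRange_cons_gen (a b st : Int) (h : (0 < st ∧ a < b) ∨ (st < 0 ∧ b < a)) :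
    PySem.List.pyRange a b st = a :: PySem.List.pyRange (a + st) b st := by
  have hst : st ≠ 0 := by omega
  simp only [PySem.List.pyRange, if_neg hst]
  rcases h with ⟨h1, h2⟩ | ⟨h1, h2⟩
  · have hpos : 0 < st := h1
    rw [if_pos hpos, if_pos h2, if_pos hpos]
    have hkey : b - a + st - 1 = (b - (a + st) + st - 1) + 1 * st := by ring
    have hdiv : (b - a + st - 1) / st = (b - (a + st) + st - 1) / st + 1 := by
      rw [hkey, Int.add_mul_ediv_right _ _ hst]
    by_cases h3 : a + st < b
    · rw [if_pos h3]
      have hnn : 0 ≤ (b - (a + st) + st - 1) / st :=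
        Int.ediv_nonneg (by omega) (by omega)
      rw [hdiv]
      have : ((b - (a + st) + st - 1) / st + 1).toNat = ((b - (a + st) + st - 1) / st).toNat + 1 := by
        omega
      rw [this, List.range_succ_eq_map, List.map_cons, List.map_map]
      congr 1
      · simp
      · apply List.map_congr_left
        intro x _
        simp only [Function.comp_apply]
        push_cast
        ring
    · rw [if_neg h3]
      have hb1 : b - a - 1 < st := by omega
      have hb0 : 0 ≤ b - a - 1 := by omega
      have : (b - a + st - 1) / st = 1 := by
        have : b - a + st - 1 = (b - a - 1) + 1 * st := by ring
        rw [this, Int.add_mul_ediv_right _ _ hst, Int.ediv_eq_zero_of_lt hb0 hb1]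
        norm_num
      rw [this]
      simp
  · have hneg : ¬ (0 < st) := by omega
    rw [if_neg hneg, if_pos h2, if_neg hneg]
    have hst' : (-st) ≠ 0 := by omega
    have hdiv : (a - b + -st - 1) / (-st) = (a + st - b + -st - 1) / (-st) + 1 := by
      have hkey : a - b + -st - 1 = (a + st - b + -st - 1) + 1 * (-st) := by ring
      rw [hkey, Int.add_mul_ediv_right _ _ hst']
    by_cases h3 : b < a + st
    · rw [if_pos h3]
      have hnn : 0 ≤ (a + st - b + -st - 1) / (-st) :=
        Int.ediv_nonneg (by omega) (by omega)
      rw [hdiv]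
      have : ((a + st - b + -st - 1) / (-st) + 1).toNat = ((a + st - b + -st - 1) / (-st)).toNat + 1 := by
        omega
      rw [this, List.range_succ_eq_map, List.map_cons, List.map_map]
      congr 1
      · simp
      · apply List.map_congr_left
        intro x _
        simp only [Function.comp_apply]
        push_cast
        ring
    · rw [if_neg h3]
      have hb1 : a - b - 1 < -st := by omega
      have hb0 : 0 ≤ a - b - 1 := by omega
      have : (a - b + -st - 1) / (-st) = 1 := by
        have : a - b + -st - 1 = (a - b - 1) + 1 * (-st) := by ring
        rw [this, Int.add_mul_ediv_right _ _ hst', Int.ediv_eq_zero_of_lt hb0 hb1]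
        norm_num
      rw [this]
      simp

lemma pyRange_nil_gen (a b st : Int) (h : ¬ ((0 < st ∧ a < b) ∨ (st < 0 ∧ b < a))) :
    PySem.List.pyRange a b st = [] := by
  simp only [PySem.List.pyRange]
  split
  · rfl
  · rename_i hst
    have h1 : ¬ (0 < st ∧ a < b) := fun hc => h (Or.inl hc)
    have h2 : ¬ (st < 0 ∧ b < a) := fun hc => h (Or.inr hc)
    by_cases hp : 0 < st
    · rw [if_pos hp, if_neg (by omega)]
      simp
    · rw [if_neg hp, if_neg (by omega)]
      simp

-- A's fold carries the end index e in its state; along pyRange a b k starting from e = a + k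
-- it always slices s[i : i+k], so it builds set(chunks)
lemma foldA_eq (s : String) (k b : Int) :
    ∀ (c : Nat) (a : Int) (acc : PySem.Set String),
      (PySem.List.pyRange a b k).length = c →
      ((PySem.List.pyRange a b k).foldl
        (fun (p : PySem.Set String × Int) i =>
          (PySem.Set.add p.1 (PySem.Str.slice s (some i) (some p.2)), p.2 + k))
        (acc, a + k)).1
      = ((PySem.List.pyRange a b k).map (fun i => PySem.Str.slice s (some i) (some (i + k)))).foldl
          PySem.Set.add acc := by
  intro c
  induction c with
  | zero =>
    intro a acc hlen
    rw [List.length_eq_zero_iff.mp hlen]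
    rfl
  | succ c ih =>
    intro a acc hlen
    by_cases h : (0 < k ∧ a < b) ∨ (k < 0 ∧ b < a)
    · rw [pyRange_cons_gen a b k h] at hlen ⊢
      simp only [List.foldl_cons, List.map_cons]
      have hlen' : (PySem.List.pyRange (a + k) b k).length = c := by
        simpa using hlen
      exact ih (a + k) (PySem.Set.add acc (PySem.Str.slice s (some a) (some (a + k)))) hlen'
    · rw [pyRange_nil_gen a b k h] at hlen
      simp at hlen

-- in a (·≤·)-pairwise (i.e. sorted) nonempty list, the number of adjacent mismatching
-- pairs is the number of distinct elements minus one
lemma adj_sorted (M : List String) (hp : M.Pairwise (· ≤ ·)) :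
    ∀ acc : Int, M ≠ [] → pvAdjMismatches M acc = acc + (M.toFinset.card : Int) - 1 := by
  induction M with
  | nil => intro acc h; exact absurd rfl h
  | cons a t ih =>
    match t, hp with
    | [], _ => intro acc _; simp [pvAdjMismatches]
    | b :: t', hp =>
      intro acc _
      have hab : a ≤ b := (List.pairwise_cons.mp hp).1 b (by simp)
      have hp' : (b :: t').Pairwise (· ≤ ·) := (List.pairwise_cons.mp hp).2
      have hstep : pvAdjMismatches (a :: b :: t') acc
          = pvAdjMismatches (b :: t') (if a ≠ b then acc + 1 else acc) := rfl
      rw [hstep, ih hp' _ (by simp)]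
      by_cases heq : a = b
      · have hc : (a :: b :: t').toFinset = (b :: t').toFinset := by
          subst heq
          simp
        rw [hc, if_neg (by simp [heq])]
      · have hnotmem : a ∉ (b :: t').toFinset := by
          simp only [List.toFinset_cons, Finset.mem_insert, List.mem_toFinset]
          rintro (h | h)
          · exact heq h
          · have hba : b ≤ a := (List.pairwise_cons.mp hp').1 a h
            exact heq (le_antisymm hab hba)
        have hc : (a :: b :: t').toFinset.card = (b :: t').toFinset.card + 1 := by
          rw [List.toFinset_cons, Finset.card_insert_of_notMem hnotmem]
        rw [if_pos heq, hc]
        push_cast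
        ring

-- a PySem.Set built by folding add over a list has as many elements as the list has
-- distinct elements
lemma len_foldl_add (L : List String) :
    ((L.foldl PySem.Set.add ([] : PySem.Set String)) : List String).length = L.toFinset.card := by
  have h1 : L.foldl PySem.Set.add ([] : PySem.Set String) = PySem.Set.ofList L :=
    (PySem.Set.ofList_eq_foldl L).symm
  rw [h1]
  have hnd : (PySem.Set.ofList L).Nodup := PySem.Set.nodup_ofList L
  have hfs : (PySem.Set.ofList L).toFinset = L.toFinset := by
    ext x
    simp [PySem.Set.mem_ofList]
  rw [← hfs, ← List.toFinset_card_of_nodup hnd]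

-- ===== VERDICT (by name: the statement is the Claim_ definition above) =====
theorem kSubstrConcat_spec : Claim_equal_kSubstrConcat := by
  unfold Claim_equal_kSubstrConcat
  intro n s k _ hpre
  unfold Spec_kSubstrConcat kSubstrConcat kSubstrConcat_alt
  by_cases hmod : PySem.Int.mod n k ≠ 0
  · rw [if_pos hmod, if_pos hmod]
  · rw [if_neg hmod, if_neg hmod]
    set b := n - k + 1 with hb
    -- A's set is set(chunks)
    have hA := foldA_eq s k b (PySem.List.pyRange 0 b k).length 0 [] rfl
    rw [zero_add] at hA
    simp only [hA]
    set L := (PySem.List.pyRange 0 b k).map (fun i => PySem.Str.slice s (some i) (some (i + k)))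
      with hL
    set M := L.mergeSort (fun a b => a ≤ b) with hM
    have hperm : M.Perm L := List.mergeSort_perm L _
    have hfs : M.toFinset = L.toFinset := List.toFinset_eq_of_perm M L hperm
    have hlen : PySem.Set.len (L.foldl PySem.Set.add ([] : PySem.Set String))
        = (L.toFinset.card : Int) := by
      simpa [PySem.Set.len] using congrArg (fun m : Nat => (m : Int)) (len_foldl_add L)
    by_cases hLnil : L = []
    · have hMnil : M = [] := by
        rw [hM, hLnil, List.mergeSort_nil]
      simp [hMnil, hLnil, pvAdjMismatches]
    · have hMne : M ≠ [] := by
        intro hc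
        rw [hc] at hperm
        exact hLnil hperm.symm.eq_nil
      have hpw : M.Pairwise (· ≤ ·) := by
        have h := List.pairwise_mergeSort (le := fun a b : String => decide (a ≤ b)) (l := L)
          (by intro x y z hxy hyz; simp only [decide_eq_true_eq] at *; exact le_trans hxy hyz)
          (by intro x y; simp [le_total])
        rw [hM]
        exact h.imp (fun hb => by simpa using hb)
      rw [adj_sorted M hpw 0 hMne, hlen, hfs]
      split_ifs <;> push_cast at * <;> omega
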